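-- pv_equiv track=rewrite | github.com/sangwopa/baekjoon.py | programmers/프렌즈4블록.py | remove_block
-- ===== SOURCE A (Python) =====
-- def remove_block(m, n, board):
--     tmp = []
--     for i in reversed(range(1, m)):
--         for p in reversed(range(1, n)):
--             if (board[i][p] == board[i-1][p] == board[i][p-1] == board[i-1][p-1]) and board[i][p] != 0:
--                 tmp.append([i, p])
--
--     if len(tmp) == 0:
--         return 0, board
--     else:
--         for i in tmp:
--             board[i[0]][i[1]] = 0
--             board[i[0]-1][i[1]] = 0
--             board[i[0]][i[1]-1] = 0
--             board[i[0]-1][i[1]-1] = 0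
--
--         return 1, board
-- ===== SOURCE B (Python) =====
-- def remove_block(m, n, board):
--     # For each cell decide directly whether it belongs to a matched 2x2 block
--     # (i.e. one of the up-to-4 blocks it could be a member of matches), and
--     # rebuild the board in a single pass -- no anchor list, no marking pass.
--     def hit(i, p):
--         return (1 <= i < m and 1 <= p < n and board[i][p] != 0
--                 and board[i][p] == board[i - 1][p] == board[i][p - 1] == board[i - 1][p - 1])
--
--     changed = 0
--     new = []
--     for r in range(len(board)):
--         row = []
--         for c in range(len(board[r])):
--             if hit(r, c) or hit(r + 1, c) or hit(r, c + 1) or hit(r + 1, c + 1):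
--                 changed = 1
--                 row.append(0)
--             else:
--                 row.append(board[r][c])
--         new.append(row)
--     return changed, new
-- ===== Notes on version B (the rewrite author's own statement) =====
-- stated objective: alternative
-- what changed: B abandons A's two-phase detect-then-mark design (collect 2x2 anchor coordinates, then four in-place assignments per anchor): it rebuilds the board in a single pass, deciding for each cell directly whether any of the up-to-4 blocks that cell could belong to matches, with no intermediate collection and no mutation pass.
import Mathlib
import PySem

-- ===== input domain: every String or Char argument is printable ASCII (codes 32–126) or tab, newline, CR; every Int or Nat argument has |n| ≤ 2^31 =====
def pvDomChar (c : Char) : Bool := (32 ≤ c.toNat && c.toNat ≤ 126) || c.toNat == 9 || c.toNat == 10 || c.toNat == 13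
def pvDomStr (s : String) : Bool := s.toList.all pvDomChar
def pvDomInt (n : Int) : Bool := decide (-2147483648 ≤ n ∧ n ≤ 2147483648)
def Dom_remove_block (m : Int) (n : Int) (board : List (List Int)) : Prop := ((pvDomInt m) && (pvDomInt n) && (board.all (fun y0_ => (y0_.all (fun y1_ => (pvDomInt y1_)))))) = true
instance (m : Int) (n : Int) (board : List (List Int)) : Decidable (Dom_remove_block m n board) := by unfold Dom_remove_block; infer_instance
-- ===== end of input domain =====

-- B replaces A's two-phase detect-then-mark algorithm (anchor list + four assignments
-- per anchor) by a single per-cell rebuild: each cell directly tests whether one of the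
-- up-to-4 blocks it could belong to matches, and the new board is built in one pass with
-- no intermediate collection (objective: alternative). In Python, A mutates `board` in
-- place while B builds a fresh board; the equivalence proved here is about the RETURN value.

-- ===== PORT A =====
-- shared read helper: board[i][p]; exact for the in-range accesses Pre_ admits
-- (out of range Python raises IndexError; the `getD` defaults are never reached inside Pre_).
def pvCell (board : List (List Int)) (i : Int) (p : Int) : Int :=
  (PySem.List.pyGet? ((PySem.List.pyGet? board i).getD []) p).getD 0

-- board[r][c] = 0; exact for the nonnegative in-range indices A assigns at.
def pvZero (b : List (List Int)) (i : Int) (p : Int) : List (List Int) :=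
  b.modify i.toNat (fun row => row.modify p.toNat (fun _ => 0))

def remove_block (m : Int) (n : Int) (board : List (List Int)) : Int × List (List Int) :=
  let tmp : List (Int × Int) :=
    ((PySem.List.pyRange 1 m 1).reverse).foldl (fun acc i =>
      ((PySem.List.pyRange 1 n 1).reverse).foldl (fun acc p =>
        if (pvCell board i p = pvCell board (i-1) p ∧
            pvCell board (i-1) p = pvCell board i (p-1) ∧
            pvCell board i (p-1) = pvCell board (i-1) (p-1)) ∧ pvCell board i p ≠ 0
        then acc ++ [(i, p)] else acc) acc) []
  if tmp.length = 0 then (0, board)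
  else
    (1, tmp.foldl (fun b e =>
          pvZero (pvZero (pvZero (pvZero b e.1 e.2) (e.1 - 1) e.2) e.1 (e.2 - 1)) (e.1 - 1) (e.2 - 1))
        board)

-- ===== PORT B =====
-- Source B's local helper `hit(i, p)`: does the 2x2 block anchored at (i, p) exist and match?
def pvHit (m : Int) (n : Int) (board : List (List Int)) (i : Int) (p : Int) : Bool :=
  decide (1 ≤ i ∧ i < m ∧ 1 ≤ p ∧ p < n ∧ pvCell board i p ≠ 0 ∧
    pvCell board i p = pvCell board (i-1) p ∧
    pvCell board (i-1) p = pvCell board i (p-1) ∧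
    pvCell board i (p-1) = pvCell board (i-1) (p-1))

def remove_block_alt (m : Int) (n : Int) (board : List (List Int)) : Int × List (List Int) :=
  let st :=
    (List.range board.length).foldl (fun st (r : Nat) =>
      let row := (board[r]?).getD []
      let inner :=
        (List.range row.length).foldl (fun st2 (c : Nat) =>
          if pvHit m n board (r:Int) (c:Int) || pvHit m n board ((r:Int)+1) (c:Int) ||
             pvHit m n board (r:Int) ((c:Int)+1) || pvHit m n board ((r:Int)+1) ((c:Int)+1)
          then ((1:Int), st2.2 ++ [(0:Int)])
          else (st2.1, st2.2 ++ [pvCell board (r:Int) (c:Int)]))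
          (st.1, ([] : List Int))
      (inner.1, st.2 ++ [inner.2]))
    ((0 : Int), ([] : List (List Int)))
  (st.1, st.2)

-- ===== PRECONDITION & SPEC =====
-- Pre_ excludes exactly the inputs on which Python A raises IndexError: when the scan is
-- non-empty (m ≥ 2 and n ≥ 2), the first m rows must exist and each have at least n entries.
def Pre_remove_block (m : Int) (n : Int) (board : List (List Int)) : Prop :=
  2 ≤ m ∧ 2 ≤ n → (m ≤ (board.length : Int) ∧ ∀ row ∈ board.take m.toNat, n ≤ (row.length : Int))
instance (m : Int) (n : Int) (board : List (List Int)) : Decidable (Pre_remove_block m n board) := by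
  unfold Pre_remove_block; infer_instance

def pvWitness_remove_block : Int × Int × List (List Int) := (2, 2, [[1, 1], [1, 1]])

def Spec_remove_block (m : Int) (n : Int) (board : List (List Int)) (out : Int × List (List Int)) : Prop := out = remove_block_alt m n board
instance (m : Int) (n : Int) (board : List (List Int)) (out : Int × List (List Int)) : Decidable (Spec_remove_block m n board out) := by unfold Spec_remove_block; infer_instance

-- ===== CLAIM (what is proved, stated in full; the proofs are below) =====
def Claim_equal_remove_block : Prop := ∀ (m : Int) (n : Int) (board : List (List Int)), Dom_remove_block m n board → Pre_remove_block m n board → Spec_remove_block m n board (remove_block m n board)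

-- ===== LEMMAS AND PROOFS =====

-- the four member cells of the block anchored at (i, p)
def pvFour (i : Int) (p : Int) : List (Int × Int) := [(i, p), (i-1, p), (i, p-1), (i-1, p-1)]

-- entry (r, c) of a board, as an Option
def pvGet2 (b : List (List Int)) (r c : Nat) : Option Int := b[r]?.bind (fun row => row[c]?)

-- "cell x is a member of some matched 2x2 block of `board`"
def pvP (m : Int) (n : Int) (board : List (List Int)) (x : Int × Int) : Prop :=
  ∃ i ∈ PySem.List.pyRange 1 m 1, ∃ p ∈ PySem.List.pyRange 1 n 1,
    ((pvCell board i p = pvCell board (i-1) p ∧ pvCell board (i-1) p = pvCell board i (p-1) ∧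
      pvCell board i (p-1) = pvCell board (i-1) (p-1)) ∧ pvCell board i p ≠ 0) ∧ x ∈ pvFour i p

-- Source B's per-cell test, as the condition in B's port
def pvH (m : Int) (n : Int) (board : List (List Int)) (r c : Int) : Bool :=
  pvHit m n board r c || pvHit m n board (r+1) c || pvHit m n board r (c+1) || pvHit m n board (r+1) (c+1)

theorem pvZero_rowlen (b : List (List Int)) (i p : Int) (r : Nat) :
    ((pvZero b i p)[r]?).map List.length = (b[r]?).map List.length := by
  simp only [pvZero, List.getElem?_modify]
  cases b[r]? with
  | none => rfl
  | some row => by_cases h : i.toNat = r <;> simp [h]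

theorem pvGet2_pvZero (b : List (List Int)) (i p : Int) (r c : Nat) :
    pvGet2 (pvZero b i p) r c =
      if i.toNat = r ∧ p.toNat = c then (pvGet2 b r c).map (fun _ => 0) else pvGet2 b r c := by
  simp only [pvGet2, pvZero]
  rw [List.getElem?_modify]
  cases hb : b[r]? with
  | none => by_cases h1 : i.toNat = r <;> simp [h1]
  | some row =>
      by_cases h1 : i.toNat = r
      · have hrow : (row.modify p.toNat (fun _ => 0))[c]? =
            if p.toNat = c then row[c]?.map (fun _ => 0) else row[c]? := by
          rw [List.getElem?_modify]
          by_cases h2 : p.toNat = c <;> cases row[c]? <;> simp [h2]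
        by_cases h2 : p.toNat = c <;> simp [h1, h2, hrow]
      · simp [h1]

-- a fold zeroing one cell per element, pointwise
theorem pvGet2_foldl (L : List (Int × Int)) (b : List (List Int)) (r c : Nat) :
    pvGet2 (L.foldl (fun b rc => pvZero b rc.1 rc.2) b) r c =
      if ∃ rc ∈ L, rc.1.toNat = r ∧ rc.2.toNat = c
      then (pvGet2 b r c).map (fun _ => 0) else pvGet2 b r c := by
  induction L generalizing b with
  | nil => simp
  | cons x t ih =>
      have hiff : (∃ rc ∈ x :: t, rc.1.toNat = r ∧ rc.2.toNat = c) ↔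
          ((x.1.toNat = r ∧ x.2.toNat = c) ∨ ∃ rc ∈ t, rc.1.toNat = r ∧ rc.2.toNat = c) := by
        constructor
        · rintro ⟨rc, hm, hrc⟩
          rcases List.mem_cons.mp hm with h | h
          · exact Or.inl (h ▸ hrc)
          · exact Or.inr ⟨rc, h, hrc⟩
        · rintro (h | ⟨rc, hm, hrc⟩)
          · exact ⟨x, List.mem_cons_self, h⟩
          · exact ⟨rc, List.mem_cons_of_mem _ hm, hrc⟩
      rw [List.foldl_cons, ih, pvGet2_pvZero]
      simp only [hiff]
      by_cases ht : ∃ rc ∈ t, rc.1.toNat = r ∧ rc.2.toNat = c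
      all_goals by_cases hx : x.1.toNat = r ∧ x.2.toNat = c
      all_goals simp [ht, hx]
      all_goals cases pvGet2 b r c <;> rfl

theorem foldl_rowlen (L : List (Int × Int)) (b : List (List Int)) (r : Nat) :
    ((L.foldl (fun b rc => pvZero b rc.1 rc.2) b)[r]?).map List.length = (b[r]?).map List.length := by
  induction L generalizing b with
  | nil => rfl
  | cons x t ih => simp [ih, pvZero_rowlen]

-- two boards with the same shape and the same entries are equal
theorem pvExt2 (b1 b2 : List (List Int))
    (hrl : ∀ r : Nat, (b1[r]?).map List.length = (b2[r]?).map List.length)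
    (hg : ∀ r c : Nat, pvGet2 b1 r c = pvGet2 b2 r c) : b1 = b2 := by
  apply List.ext_getElem?
  intro r
  cases h1 : b1[r]? with
  | none =>
      have := hrl r
      rw [h1] at this
      cases h2 : b2[r]? with
      | none => rfl
      | some row => rw [h2] at this; simp at this
  | some row1 =>
      have hl := hrl r
      rw [h1] at hl
      cases h2 : b2[r]? with
      | none => rw [h2] at hl; simp at hl
      | some row2 =>
          rw [h2] at hl; simp at hl
          congr 1
          apply List.ext_getElem?
          intro c
          have := hg r c
          simp only [pvGet2, h1, h2, Option.bind_some] at this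
          exact this

-- A's marking loop (four assignments per anchor) is the one-cell fold over the flattened cell list
theorem markA_eq_foldl_flat (L : List (Int × Int)) (b : List (List Int)) :
    L.foldl (fun b e =>
        pvZero (pvZero (pvZero (pvZero b e.1 e.2) (e.1 - 1) e.2) e.1 (e.2 - 1)) (e.1 - 1) (e.2 - 1)) b
      = (L.flatMap (fun e => pvFour e.1 e.2)).foldl (fun b rc => pvZero b rc.1 rc.2) b := by
  induction L generalizing b with
  | nil => rfl
  | cons x t ih => simp [pvFour, ih]

-- characterization of A's anchor list
theorem tmp_eq (m n : Int) (board : List (List Int)) :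
    (((PySem.List.pyRange 1 m 1).reverse).foldl (fun acc i =>
      ((PySem.List.pyRange 1 n 1).reverse).foldl (fun acc p =>
        if (pvCell board i p = pvCell board (i-1) p ∧
            pvCell board (i-1) p = pvCell board i (p-1) ∧
            pvCell board i (p-1) = pvCell board (i-1) (p-1)) ∧ pvCell board i p ≠ 0
        then acc ++ [(i, p)] else acc) acc) [])
    = ((PySem.List.pyRange 1 m 1).reverse).flatMap (fun i =>
        (((PySem.List.pyRange 1 n 1).reverse).filter (fun p => decide (((pvCell board i p = pvCell board (i-1) p ∧ pvCell board (i-1) p = pvCell board i (p-1) ∧ pvCell board i (p-1) = pvCell board (i-1) (p-1)) ∧ pvCell board i p ≠ 0)))).map (fun p => (i, p))) := by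
  have hinner : ∀ (i : Int) (acc : List (Int × Int)),
      ((PySem.List.pyRange 1 n 1).reverse).foldl (fun acc p =>
        if (pvCell board i p = pvCell board (i-1) p ∧
            pvCell board (i-1) p = pvCell board i (p-1) ∧
            pvCell board i (p-1) = pvCell board (i-1) (p-1)) ∧ pvCell board i p ≠ 0
        then acc ++ [(i, p)] else acc) acc
      = acc ++ (((PySem.List.pyRange 1 n 1).reverse).filter (fun p => decide (((pvCell board i p = pvCell board (i-1) p ∧ pvCell board (i-1) p = pvCell board i (p-1) ∧ pvCell board i (p-1) = pvCell board (i-1) (p-1)) ∧ pvCell board i p ≠ 0)))).map (fun p => (i, p)) := by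
    intro i acc
    exact PySem.List.foldl_append_ite (p := fun p => ((pvCell board i p = pvCell board (i-1) p ∧ pvCell board (i-1) p = pvCell board i (p-1) ∧ pvCell board i (p-1) = pvCell board (i-1) (p-1)) ∧ pvCell board i p ≠ 0)) (f := fun p => (i, p)) _ _
  calc _ = ((PySem.List.pyRange 1 m 1).reverse).foldl (fun acc i =>
            acc ++ (((PySem.List.pyRange 1 n 1).reverse).filter (fun p => decide (((pvCell board i p = pvCell board (i-1) p ∧ pvCell board (i-1) p = pvCell board i (p-1) ∧ pvCell board i (p-1) = pvCell board (i-1) (p-1)) ∧ pvCell board i p ≠ 0)))).map (fun p => (i, p))) [] := by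
          exact PySem.List.foldl_congr_mem _ _ _ _ (fun acc i _ => hinner i acc)
    _ = _ := by rw [PySem.List.foldl_append_eq_flatMap, List.nil_append]

theorem mem_tmpflat (m n : Int) (board : List (List Int)) (x : Int × Int) :
    (x ∈ (((PySem.List.pyRange 1 m 1).reverse).flatMap (fun i =>
        (((PySem.List.pyRange 1 n 1).reverse).filter (fun p => decide (((pvCell board i p = pvCell board (i-1) p ∧ pvCell board (i-1) p = pvCell board i (p-1) ∧ pvCell board i (p-1) = pvCell board (i-1) (p-1)) ∧ pvCell board i p ≠ 0)))).map (fun p => (i, p)))).flatMap (fun e => pvFour e.1 e.2))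
    ↔ pvP m n board x := by
  unfold pvP
  simp only [List.mem_flatMap, List.mem_map, List.mem_filter, List.mem_reverse]
  constructor
  · rintro ⟨e, ⟨i, hi, p, ⟨hp, hc⟩, rfl⟩, hx⟩
    exact ⟨i, hi, p, hp, by simpa using hc, hx⟩
  · rintro ⟨i, hi, p, hp, hc, hx⟩
    exact ⟨(i, p), ⟨i, hi, p, ⟨hp, by simpa using hc⟩, rfl⟩, hx⟩

theorem pvP_nonneg (m n : Int) (board : List (List Int)) (x : Int × Int) (h : pvP m n board x) :
    0 ≤ x.1 ∧ 0 ≤ x.2 := by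
  obtain ⟨i, hi, p, hp, -, hx⟩ := h
  rw [PySem.List.mem_pyRange_one] at hi hp
  simp only [pvFour, List.mem_cons, List.not_mem_nil, or_false] at hx
  rcases hx with rfl | rfl | rfl | rfl <;> constructor <;> simp <;> omega

-- the per-cell test of B is exactly "this cell is in some matched block"
theorem pvP_iff_H (m n : Int) (board : List (List Int)) (r c : Int) :
    pvP m n board (r, c) ↔ pvH m n board r c = true := by
  unfold pvH pvHit
  simp only [Bool.or_eq_true, decide_eq_true_eq, or_assoc]
  constructor
  · rintro ⟨i, hi, p, hp, ⟨⟨e1, e2, e3⟩, hne⟩, hx⟩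
    rw [PySem.List.mem_pyRange_one] at hi hp
    simp only [pvFour, List.mem_cons, List.not_mem_nil, or_false, Prod.mk.injEq] at hx
    rcases hx with ⟨h1, h2⟩ | ⟨h1, h2⟩ | ⟨h1, h2⟩ | ⟨h1, h2⟩
    · refine Or.inl ?_
      obtain rfl : i = r := h1.symm
      obtain rfl : p = c := h2.symm
      exact ⟨hi.1, hi.2, hp.1, hp.2, hne, e1, e2, e3⟩
    · refine Or.inr (Or.inl ?_)
      obtain rfl : i = r + 1 := by omega
      obtain rfl : p = c := h2.symm
      exact ⟨by omega, hi.2, hp.1, hp.2, hne, e1, e2, e3⟩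
    · refine Or.inr (Or.inr (Or.inl ?_))
      obtain rfl : i = r := h1.symm
      obtain rfl : p = c + 1 := by omega
      exact ⟨hi.1, hi.2, by omega, hp.2, hne, e1, e2, e3⟩
    · refine Or.inr (Or.inr (Or.inr ?_))
      obtain rfl : i = r + 1 := by omega
      obtain rfl : p = c + 1 := by omega
      exact ⟨by omega, hi.2, by omega, hp.2, hne, e1, e2, e3⟩
  · rintro (⟨h1, h2, h3, h4, hne, e1, e2, e3⟩ | ⟨h1, h2, h3, h4, hne, e1, e2, e3⟩ |
            ⟨h1, h2, h3, h4, hne, e1, e2, e3⟩ | ⟨h1, h2, h3, h4, hne, e1, e2, e3⟩)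
    · exact ⟨r, PySem.List.mem_pyRange_one.mpr ⟨h1, h2⟩, c, PySem.List.mem_pyRange_one.mpr ⟨h3, h4⟩,
        ⟨⟨e1, e2, e3⟩, hne⟩, by simp [pvFour]⟩
    · exact ⟨r + 1, PySem.List.mem_pyRange_one.mpr ⟨by omega, h2⟩, c, PySem.List.mem_pyRange_one.mpr ⟨h3, h4⟩,
        ⟨⟨e1, e2, e3⟩, hne⟩, by simp [pvFour]⟩
    · exact ⟨r, PySem.List.mem_pyRange_one.mpr ⟨h1, h2⟩, c + 1, PySem.List.mem_pyRange_one.mpr ⟨by omega, h4⟩,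
        ⟨⟨e1, e2, e3⟩, hne⟩, by simp [pvFour]⟩
    · exact ⟨r + 1, PySem.List.mem_pyRange_one.mpr ⟨by omega, h2⟩, c + 1, PySem.List.mem_pyRange_one.mpr ⟨by omega, h4⟩,
        ⟨⟨e1, e2, e3⟩, hne⟩, by simp [pvFour]⟩

-- A's flattened cell list reaches Nat cell (r, c) iff B's per-cell test fires there
theorem flat_cond (m n : Int) (board : List (List Int)) (flat : List (Int × Int))
    (hflat : ∀ x, x ∈ flat ↔ pvP m n board x) (r c : Nat) :
    (∃ rc ∈ flat, rc.1.toNat = r ∧ rc.2.toNat = c) ↔ pvH m n board (r:Int) (c:Int) = true := by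
  constructor
  · rintro ⟨rc, hm, h1, h2⟩
    have hp := (hflat rc).mp hm
    have hn := pvP_nonneg m n board rc hp
    have hrc : rc = ((r:Int), (c:Int)) := by
      obtain ⟨a, b⟩ := rc
      simp only [Prod.mk.injEq]
      constructor <;> [skip; skip] <;> simp only at h1 h2 hn <;> omega
    rw [hrc] at hp
    exact (pvP_iff_H m n board r c).mp hp
  · intro h
    refine ⟨((r:Int), (c:Int)), (hflat _).mpr ((pvP_iff_H m n board r c).mpr h), by simp, by simp⟩

-- B's inner fold: flag becomes 1 iff some cell of the row tests positive; the row is rebuilt per cell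
theorem B_inner (m n : Int) (board : List (List Int)) (r : Nat) (cs : List Nat) (f0 : Int) (acc : List Int) :
    cs.foldl (fun st2 (c : Nat) =>
        if pvHit m n board (r:Int) (c:Int) || pvHit m n board ((r:Int)+1) (c:Int) ||
           pvHit m n board (r:Int) ((c:Int)+1) || pvHit m n board ((r:Int)+1) ((c:Int)+1)
        then ((1:Int), st2.2 ++ [(0:Int)])
        else (st2.1, st2.2 ++ [pvCell board (r:Int) (c:Int)])) (f0, acc)
    = ((if ∃ c ∈ cs, pvH m n board (r:Int) (c:Int) = true then (1:Int) else f0),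
       acc ++ cs.map (fun (c : Nat) => if pvH m n board (r:Int) (c:Int) then (0:Int) else pvCell board (r:Int) (c:Int))) := by
  induction cs generalizing f0 acc with
  | nil => simp
  | cons c t ih =>
      rw [List.foldl_cons]
      by_cases h : pvH m n board (r:Int) (c:Int) = true
      · have h' : (pvHit m n board (r:Int) (c:Int) || pvHit m n board ((r:Int)+1) (c:Int) ||
           pvHit m n board (r:Int) ((c:Int)+1) || pvHit m n board ((r:Int)+1) ((c:Int)+1)) = true := h
        rw [if_pos h', ih]
        simp only [List.exists_mem_cons_iff, h, true_or, if_true, List.map_cons,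
          Prod.mk.injEq]
        exact ⟨by split_ifs <;> rfl, by simp⟩
      · have h' : ¬ ((pvHit m n board (r:Int) (c:Int) || pvHit m n board ((r:Int)+1) (c:Int) ||
           pvHit m n board (r:Int) ((c:Int)+1) || pvHit m n board ((r:Int)+1) ((c:Int)+1)) = true) := h
        rw [if_neg h', ih]
        simp only [List.exists_mem_cons_iff, h, List.map_cons, Prod.mk.injEq]
        exact ⟨by simp, by simp⟩

-- B's outer fold: flag is 1 iff some in-board cell tests positive; the board is rebuilt row by row
theorem B_outer (m n : Int) (board : List (List Int)) (rs : List Nat) (f0 : Int) (acc : List (List Int)) :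
    rs.foldl (fun st (r : Nat) =>
      let row := (board[r]?).getD []
      let inner :=
        (List.range row.length).foldl (fun st2 (c : Nat) =>
          if pvHit m n board (r:Int) (c:Int) || pvHit m n board ((r:Int)+1) (c:Int) ||
             pvHit m n board (r:Int) ((c:Int)+1) || pvHit m n board ((r:Int)+1) ((c:Int)+1)
          then ((1:Int), st2.2 ++ [(0:Int)])
          else (st2.1, st2.2 ++ [pvCell board (r:Int) (c:Int)]))
          (st.1, ([] : List Int))
      (inner.1, st.2 ++ [inner.2])) (f0, acc)
    = ((if ∃ r ∈ rs, ∃ c ∈ List.range (((board[r]?).getD []).length), pvH m n board (r:Int) (c:Int) = true then (1:Int) else f0),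
       acc ++ rs.map (fun (r : Nat) => (List.range (((board[r]?).getD []).length)).map
         (fun (c : Nat) => if pvH m n board (r:Int) (c:Int) then (0:Int) else pvCell board (r:Int) (c:Int)))) := by
  induction rs generalizing f0 acc with
  | nil => simp
  | cons r t ih =>
      rw [List.foldl_cons]
      simp only []
      rw [B_inner, ih]
      by_cases h : ∃ c ∈ List.range (((board[r]?).getD []).length), pvH m n board (r:Int) (c:Int) = true
      · simp only [List.exists_mem_cons_iff, h, true_or, if_true, List.map_cons,
          Prod.mk.injEq]
        exact ⟨by split_ifs <;> rfl, by simp⟩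
      · simp only [List.exists_mem_cons_iff, h, List.map_cons, Prod.mk.injEq]
        exact ⟨by simp, by simp⟩

-- B's port, in closed form
theorem alt_eq (m n : Int) (board : List (List Int)) :
    remove_block_alt m n board
    = ((if ∃ r ∈ List.range board.length, ∃ c ∈ List.range (((board[r]?).getD []).length), pvH m n board (r:Int) (c:Int) = true then (1:Int) else 0),
       (List.range board.length).map (fun (r : Nat) => (List.range (((board[r]?).getD []).length)).map
         (fun (c : Nat) => if pvH m n board (r:Int) (c:Int) then (0:Int) else pvCell board (r:Int) (c:Int)))) := by
  unfold remove_block_alt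
  rw [B_outer]
  simp

-- entries of B's rebuilt board, pointwise
theorem pvGet2_altBoard (m n : Int) (board : List (List Int)) (r c : Nat) :
    pvGet2 ((List.range board.length).map (fun (r : Nat) => (List.range (((board[r]?).getD []).length)).map
        (fun (c : Nat) => if pvH m n board (r:Int) (c:Int) then (0:Int) else pvCell board (r:Int) (c:Int)))) r c
    = if pvH m n board (r:Int) (c:Int) = true then (pvGet2 board r c).map (fun _ => 0) else pvGet2 board r c := by
  simp only [pvGet2]
  rw [List.getElem?_map]
  by_cases hr : r < board.length
  · rw [List.getElem?_range hr]
    simp only [Option.map_some, Option.bind_some]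
    rw [List.getElem?_map]
    cases hrow : board[r]? with
    | none => exact absurd hrow (by simp [hr])
    | some row =>
        simp only [Option.getD_some, Option.bind_some]
        by_cases hc : c < row.length
        · rw [List.getElem?_range hc]
          cases hv : row[c]? with
          | none => exact absurd hv (by simp [hc])
          | some v =>
              have hcell : pvCell board (r:Int) (c:Int) = v := by
                simp [pvCell, hrow, hv]
              simp only [Option.map_some, hcell]
              by_cases h : pvH m n board (r:Int) (c:Int) = true
              · simp [h]
              · simp [h]
        · rw [List.getElem?_eq_none (by simpa using Nat.le_of_not_lt hc : (List.range row.length).length ≤ c)]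
          rw [List.getElem?_eq_none (Nat.le_of_not_lt hc : row.length ≤ c)]
          simp only [Option.map_none]
          split_ifs <;> rfl
  · rw [List.getElem?_eq_none (by simpa using Nat.le_of_not_lt hr : (List.range board.length).length ≤ r)]
    rw [List.getElem?_eq_none (Nat.le_of_not_lt hr : board.length ≤ r)]
    split_ifs <;> simp

-- an anchor of A exists iff some in-board cell passes B's test (needs Pre_)
theorem flag_iff (m n : Int) (board : List (List Int)) (hpre : Pre_remove_block m n board) :
    (∃ x, pvP m n board x) ↔
    (∃ r ∈ List.range board.length, ∃ c ∈ List.range (((board[r]?).getD []).length), pvH m n board (r:Int) (c:Int) = true) := by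
  constructor
  · rintro ⟨x, hx⟩
    obtain ⟨i, hi, p, hp, hM, -⟩ := hx
    rw [PySem.List.mem_pyRange_one] at hi hp
    have hmn : 2 ≤ m ∧ 2 ≤ n := ⟨by omega, by omega⟩
    obtain ⟨hlen, hrows⟩ := hpre hmn
    have hr : i.toNat < board.length := by omega
    cases hrow : board[i.toNat]? with
    | none => exact absurd hrow (by simp [hr])
    | some row =>
        have hrowmem : row ∈ board.take m.toNat := by
          have hrt : (board.take m.toNat)[i.toNat]? = some row := by
            rw [List.getElem?_take]
            simp [hrow, (by omega : i.toNat < m.toNat)]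
          exact List.mem_of_getElem? hrt
        have hrl : n ≤ (row.length : Int) := hrows row hrowmem
        have hc : p.toNat < row.length := by omega
        refine ⟨i.toNat, List.mem_range.mpr hr, p.toNat,
          List.mem_range.mpr (by simp [hrow]; omega), ?_⟩
        refine (pvP_iff_H m n board (i.toNat:Int) (p.toNat:Int)).mp ?_
        refine ⟨i, PySem.List.mem_pyRange_one.mpr hi, p, PySem.List.mem_pyRange_one.mpr hp, hM, ?_⟩
        have h1 : ((i.toNat : Int), (p.toNat : Int)) = (i, p) := by
          simp only [Prod.mk.injEq]
          omega
        rw [h1]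
        simp [pvFour]
  · rintro ⟨r, -, c, -, h⟩
    exact ⟨((r:Int), (c:Int)), (pvP_iff_H m n board r c).mpr h⟩

-- ===== VERDICT (by name: the statement is the Claim_ definition above) =====
theorem remove_block_spec : Claim_equal_remove_block := by
  intro m n board _ hpre
  unfold Spec_remove_block
  unfold remove_block
  rw [tmp_eq, alt_eq]
  set L := ((PySem.List.pyRange 1 m 1).reverse).flatMap (fun i =>
      (((PySem.List.pyRange 1 n 1).reverse).filter (fun p => decide (((pvCell board i p = pvCell board (i-1) p ∧ pvCell board (i-1) p = pvCell board i (p-1) ∧ pvCell board i (p-1) = pvCell board (i-1) (p-1)) ∧ pvCell board i p ≠ 0)))).map (fun p => (i, p))) with hL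
  have hflat : ∀ x, x ∈ L.flatMap (fun e => pvFour e.1 e.2) ↔ pvP m n board x := by
    intro x
    rw [hL]
    exact mem_tmpflat m n board x
  have hlenB : ∀ r : Nat,
      (((List.range board.length).map (fun (r : Nat) => (List.range (((board[r]?).getD []).length)).map
        (fun (c : Nat) => if pvH m n board (r:Int) (c:Int) then (0:Int) else pvCell board (r:Int) (c:Int))))[r]?).map List.length
      = (board[r]?).map List.length := by
    intro r
    rw [List.getElem?_map]
    by_cases hr : r < board.length
    · rw [List.getElem?_range hr]
      cases hrow : board[r]? with
      | none => exact absurd hrow (by simp [hr])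
      | some row => simp [hrow]
    · rw [List.getElem?_eq_none (by simpa using Nat.le_of_not_lt hr : (List.range board.length).length ≤ r)]
      rw [List.getElem?_eq_none (Nat.le_of_not_lt hr : board.length ≤ r)]
      rfl
  have hboard : L.foldl (fun b e =>
        pvZero (pvZero (pvZero (pvZero b e.1 e.2) (e.1 - 1) e.2) e.1 (e.2 - 1)) (e.1 - 1) (e.2 - 1)) board
      = (List.range board.length).map (fun (r : Nat) => (List.range (((board[r]?).getD []).length)).map
        (fun (c : Nat) => if pvH m n board (r:Int) (c:Int) then (0:Int) else pvCell board (r:Int) (c:Int))) := by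
    rw [markA_eq_foldl_flat]
    apply pvExt2
    · intro r
      rw [foldl_rowlen, hlenB]
    · intro r c
      rw [pvGet2_foldl, pvGet2_altBoard]
      exact if_congr (flat_cond m n board _ hflat r c) rfl rfl
  by_cases hemp : L = []
  · have hnoP : ¬ ∃ x, pvP m n board x := by
      rintro ⟨x, hx⟩
      have := (hflat x).mpr hx
      rw [hemp] at this
      simp at this
    have hnoH : ¬ (∃ r ∈ List.range board.length, ∃ c ∈ List.range (((board[r]?).getD []).length),
        pvH m n board (r:Int) (c:Int) = true) := fun h => hnoP ((flag_iff m n board hpre).mpr h)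
    rw [if_pos (by simp [hemp]), if_neg hnoH]
    have hb : board = (List.range board.length).map (fun (r : Nat) => (List.range (((board[r]?).getD []).length)).map
        (fun (c : Nat) => if pvH m n board (r:Int) (c:Int) then (0:Int) else pvCell board (r:Int) (c:Int))) := by
      rw [← hboard, hemp]
      rfl
    rw [← hb]
  · obtain ⟨e, he⟩ := List.exists_mem_of_ne_nil L hemp
    have hxP : pvP m n board (e.1, e.2) := by
      refine (hflat (e.1, e.2)).mp ?_
      refine List.mem_flatMap.mpr ⟨e, he, ?_⟩
      simp [pvFour]
    have hex : ∃ r ∈ List.range board.length, ∃ c ∈ List.range (((board[r]?).getD []).length),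
        pvH m n board (r:Int) (c:Int) = true := (flag_iff m n board hpre).mp ⟨_, hxP⟩
    rw [if_neg (by simp [hemp]), if_pos hex]
    simp only [Prod.mk.injEq]
    exact ⟨trivial, hboard⟩
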